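-- pv_equiv track=rewrite | github.com/bxinformations/BX-information | CS/CSE101/Tutorial_4/shopping.py | add_recipes
-- ===== SOURCE A (Python) =====
-- def add_recipes(recipes):
--     """Return a dictionary representing the sum of all of
--     the recipe dictionaries in recipes.
--     """
--     result = {}
--     for i in range(len(recipes)):
--         for k in recipes[i].keys():
--             if k in result.keys():
--                 result[k] += recipes[i][k]
--             else:
--                 result[k] = recipes[i][k]
--     return result
-- ===== SOURCE B (Python) =====
-- def add_recipes(recipes):
--     """Return a dictionary representing the sum of all of
--     the recipe dictionaries in recipes.
--     """
--     keys = []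
--     seen = set()
--     for recipe in recipes:
--         for k in recipe:
--             if k not in seen:
--                 seen.add(k)
--                 keys.append(k)
--     return {k: sum(r[k] for r in recipes if k in r) for k in keys}
-- ===== Notes on version B (the rewrite author's own statement) =====
-- stated objective: alternative
-- what changed: A builds the result in one fused scan with an in-place running total per key; B never keeps a running total: it first builds an index of all keys in first-occurrence order, then for each key rescans the whole recipe list and sums the values present for that key.
import Mathlib
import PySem

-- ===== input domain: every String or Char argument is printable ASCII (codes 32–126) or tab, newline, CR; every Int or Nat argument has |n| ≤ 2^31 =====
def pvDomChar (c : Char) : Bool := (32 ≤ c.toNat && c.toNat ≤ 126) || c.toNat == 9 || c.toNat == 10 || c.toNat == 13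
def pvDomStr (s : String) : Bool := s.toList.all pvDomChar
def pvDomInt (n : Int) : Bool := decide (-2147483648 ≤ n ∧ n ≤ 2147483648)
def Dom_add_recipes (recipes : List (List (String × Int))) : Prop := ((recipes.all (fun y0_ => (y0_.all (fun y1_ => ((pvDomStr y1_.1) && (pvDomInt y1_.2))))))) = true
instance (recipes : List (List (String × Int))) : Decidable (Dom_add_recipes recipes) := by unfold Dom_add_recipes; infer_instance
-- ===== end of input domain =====

-- B replaces A's fused running-total scan by a two-phase key-index algorithm: collect all keys in first-occurrence order, then rescan the recipe list per key and sum the values present; alternative decomposition, not faster.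


-- ===== PORT A =====
-- Each inner list represents a Python dict; PySem.Dict.ofList is that dict.
def add_recipes (recipes : List (List (String × Int))) : List (String × Int) :=
  (recipes.foldl (fun result r =>
      let d := PySem.Dict.ofList r
      d.keys.foldl (fun result k =>
        if result.contains k then
          result.insert k (result.getD k 0 + d.getD k 0)
        else
          result.insert k (d.getD k 0)) result)
    PySem.Dict.empty).items

-- ===== PORT B =====
-- The (keys, seen) pair carries B's key-index loop state; the per-key
-- generator sum 'sum(r[k] for r in recipes if k in r)' is filter-then-map-then-sum.
def add_recipes_alt (recipes : List (List (String × Int))) : List (String × Int) :=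
  let st := recipes.foldl (fun st r =>
      (PySem.Dict.ofList r).keys.foldl (fun st k =>
        if st.2.contains k then st else (st.1 ++ [k], PySem.Set.add st.2 k)) st)
    (([] : List String), (PySem.Set.empty : PySem.Set String))
  let keys := st.1
  keys.map (fun k =>
    (k, (((recipes.map PySem.Dict.ofList).filter (fun d => d.contains k)).map
          (fun d => d.getD k 0)).sum))

-- ===== PRECONDITION & SPEC =====
def Spec_add_recipes (recipes : List (List (String × Int))) (out : List (String × Int)) : Prop := out = add_recipes_alt recipes
instance (recipes : List (List (String × Int))) (out : List (String × Int)) : Decidable (Spec_add_recipes recipes out) := by unfold Spec_add_recipes; infer_instance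

-- ===== CLAIM (what is proved, stated in full; the proofs are below) =====
def Claim_equal_add_recipes : Prop := ∀ (recipes : List (List (String × Int))), Dom_add_recipes recipes → Spec_add_recipes recipes (add_recipes recipes)

-- ===== LEMMAS AND PROOFS =====

-- A's running-total step, with its two branches merged into one insert.
def ins (d : PySem.Dict String Int) (p : String × Int) : PySem.Dict String Int :=
  d.insert p.1 (d.getD p.1 0 + p.2)

lemma step_eq (res : PySem.Dict String Int) (p : String × Int) :
    (if res.contains p.1 then res.insert p.1 (res.getD p.1 0 + p.2) else res.insert p.1 p.2)
      = ins res p := by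
  by_cases h : res.contains p.1 = true
  · simp [ins, h]
  · have h0 : res.getD p.1 0 = 0 :=
      PySem.Dict.getD_of_not_contains res 0 (by simpa using h)
    simp [ins, h, h0]

-- A's accumulated entry for k is the sum of the values filed under k.
lemma getD_foldl_ins (pairs : List (String × Int)) (d : PySem.Dict String Int) (k : String) :
    (pairs.foldl ins d).getD k 0
      = d.getD k 0 + ((pairs.filter (fun p => p.1 == k)).map (·.2)).sum := by
  induction pairs generalizing d with
  | nil => simp
  | cons p ps ih =>
    simp only [List.foldl_cons, ih, List.filter_cons]
    by_cases h : p.1 = k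
    · simp [ins, h]; ring
    · simp [ins, h, PySem.Dict.getD_insert, Ne.symm h]

-- A nodup list filtered by equality with k is [k] or [].
lemma filter_beq_of_nodup (l : List String) (k : String) (h : l.Nodup) :
    l.filter (fun k' => k' == k) = if k ∈ l then [k] else [] := by
  induction l with
  | nil => simp
  | cons a l ih =>
    rcases List.nodup_cons.mp h with ⟨ha, hl⟩
    by_cases hak : a = k
    · subst hak
      simp [ih hl, ha]
    · simp [hak, ih hl, Ne.symm hak]

-- One dict's contribution to key k: its value if it contains k, else nothing.
lemma dict_filter_sum (d : PySem.Dict String Int) (k : String) (h : d.keys.Nodup) :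
    ((d.items.filter (fun p => p.1 == k)).map (·.2)).sum
      = if d.contains k then d.getD k 0 else 0 := by
  rw [PySem.Dict.items_eq_map_keys d h 0, List.filter_map]
  have : (fun p => p.1 == k) ∘ (fun k' => (k', d.getD k' 0)) = (fun k' => k' == k) := rfl
  rw [this, filter_beq_of_nodup d.keys k h]
  by_cases hm : k ∈ d.keys
  · have : d.contains k := (PySem.Dict.contains_iff_mem_keys d k).mpr hm
    simp [hm, this]
  · have : ¬ d.contains k = true := fun hc => hm ((PySem.Dict.contains_iff_mem_keys d k).mp hc)
    simp [hm, this]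

-- Summing one filtered pass over all dicts = summing the per-key filtered values.
lemma sum_over_dicts (ds : List (PySem.Dict String Int)) (k : String)
    (h : ∀ d ∈ ds, d.keys.Nodup) :
    (((ds.flatMap PySem.Dict.items).filter (fun p => p.1 == k)).map (·.2)).sum
      = ((ds.filter (fun d => d.contains k)).map (fun d => d.getD k 0)).sum := by
  induction ds with
  | nil => simp
  | cons d ds ih =>
    simp only [List.flatMap_cons, List.filter_append, List.map_append, List.sum_append,
      List.filter_cons]
    rw [ih (fun d' hd' => h d' (List.mem_cons_of_mem _ hd')),
      dict_filter_sum d k (h d (List.mem_cons_self))]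
    by_cases hc : d.contains k = true
    · simp [hc]
    · simp [hc]

-- When keys = seen, B's pair step is Set.add on both components.
lemma pair_fold (l : List String) (ks : PySem.Set String) :
    l.foldl (fun st k =>
        if st.2.contains k then st else (st.1 ++ [k], PySem.Set.add st.2 k)) (ks, ks)
      = (l.foldl PySem.Set.add ks, l.foldl PySem.Set.add ks) := by
  induction l generalizing ks with
  | nil => rfl
  | cons a l ih =>
    simp only [List.foldl_cons]
    by_cases h : PySem.Set.contains ks a = true
    · rw [if_pos h]
      simp only [PySem.Set.contains, List.contains_iff_mem] at h
      have : PySem.Set.add ks a = ks := by simp [PySem.Set.add, h]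
      rw [this, ih]
    · rw [if_neg h]
      simp only [PySem.Set.contains, List.contains_iff_mem] at h
      have : PySem.Set.add ks a = ks ++ [a] := by simp [PySem.Set.add, h]
      rw [this, ih]

-- B's whole phase-1 loop keeps keys = seen, both equal to the plain Set.add fold.
lemma pairs_fold_recipes (recipes : List (List (String × Int))) (ks : PySem.Set String) :
    recipes.foldl (fun st r =>
        (PySem.Dict.ofList r).keys.foldl (fun st k =>
          if st.2.contains k then st else (st.1 ++ [k], PySem.Set.add st.2 k)) st) (ks, ks)
      = (recipes.foldl (fun ks r => (PySem.Dict.ofList r).keys.foldl PySem.Set.add ks) ks,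
         recipes.foldl (fun ks r => (PySem.Dict.ofList r).keys.foldl PySem.Set.add ks) ks) := by
  induction recipes generalizing ks with
  | nil => rfl
  | cons r rs ih =>
    simp only [List.foldl_cons]
    rw [pair_fold, ih]

theorem add_recipes_eq_alt (recipes : List (List (String × Int))) :
    add_recipes recipes = add_recipes_alt recipes := by
  -- A's fused loop over recipes = a single accumulating fold over the flattened items
  have hinner : ∀ (d : PySem.Dict String Int) (res : PySem.Dict String Int), d.keys.Nodup →
      d.keys.foldl (fun result k =>
        if result.contains k then
          result.insert k (result.getD k 0 + d.getD k 0)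
        else
          result.insert k (d.getD k 0)) res = d.items.foldl ins res := by
    intro d res hd
    rw [PySem.Dict.items_eq_map_keys d hd 0, List.foldl_map]
    exact PySem.List.foldl_congr_mem _ _ _ _ (fun res' k _ => step_eq res' (k, d.getD k 0))
  have hA : add_recipes recipes
      = (((recipes.map PySem.Dict.ofList).flatMap PySem.Dict.items).foldl ins PySem.Dict.empty).items := by
    unfold add_recipes
    rw [List.foldl_flatMap, List.foldl_map]
    congr 1
    exact PySem.List.foldl_congr_mem _ _ _ _ (fun res r _ => hinner _ res (PySem.Dict.nodup_keys_ofList r))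
  set ds := recipes.map PySem.Dict.ofList with hds
  set pairs := ds.flatMap PySem.Dict.items with hpairs
  set D := pairs.foldl ins PySem.Dict.empty with hD
  have hDnodup : D.keys.Nodup :=
    PySem.Dict.nodup_keys_foldl_insert_key pairs Prod.fst
      (fun d p => d.getD p.1 0 + p.2) PySem.Dict.empty PySem.Dict.nodup_keys_empty
  -- A's key order (insertion order of first occurrences) is B's key index.
  have hkeys : D.keys
      = recipes.foldl (fun ks r => (PySem.Dict.ofList r).keys.foldl PySem.Set.add ks)
          (PySem.Set.empty : PySem.Set String) := by
    rw [hD]; unfold ins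
    rw [PySem.Dict.keys_foldl_insert_key pairs Prod.fst (fun d p => d.getD p.1 0 + p.2)
      PySem.Dict.empty]
    show PySem.Set.update PySem.Dict.empty.keys (pairs.map Prod.fst) = _
    have hmap : pairs.map Prod.fst = recipes.flatMap (fun r => (PySem.Dict.ofList r).keys) := by
      rw [hpairs, hds, List.map_flatMap, List.flatMap_map]
      rfl
    rw [hmap]
    show (recipes.flatMap (fun r => (PySem.Dict.ofList r).keys)).foldl PySem.Set.add _ = _
    rw [List.foldl_flatMap]
    rfl
  have hval : ∀ k : String, D.getD k 0
      = ((ds.filter (fun d => d.contains k)).map (fun d => d.getD k 0)).sum := by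
    intro k
    rw [hD, getD_foldl_ins, PySem.Dict.getD_empty, zero_add, hpairs,
      sum_over_dicts ds k]
    intro d hd
    rcases List.mem_map.mp (hds ▸ hd) with ⟨r, _, rfl⟩
    exact PySem.Dict.nodup_keys_ofList r
  rw [hA]
  show D.items = add_recipes_alt recipes
  rw [PySem.Dict.items_eq_map_keys D hDnodup 0]
  unfold add_recipes_alt
  have : (([] : List String), (PySem.Set.empty : PySem.Set String))
      = ((PySem.Set.empty : PySem.Set String), (PySem.Set.empty : PySem.Set String)) := rfl
  rw [this, pairs_fold_recipes, ← hds]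
  simp only [← hkeys]
  exact List.map_congr_left (fun k _ => by rw [hval k])

-- ===== VERDICT (by name: the statement is the Claim_ definition above) =====
theorem add_recipes_spec : Claim_equal_add_recipes := by
  intro recipes _
  unfold Spec_add_recipes
  exact add_recipes_eq_alt recipes
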